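-- pv_equiv track=rewrite | github.com/abachaa/MEDIQA-CORR-2024 | evaluation/mediqa-corr-2024-eval-script-2-all-metrics.py | get_nlg_eval_data
-- ===== SOURCE A (Python) =====
-- import string
--
-- def increment_counter(counters, counter_name):
--     counters[counter_name] = counters[counter_name] + 1
--
-- def get_nlg_eval_data(reference_corrections, candidate_corrections, remove_nonprint = False):
--     references = []
--     predictions = []
--
--     counters = {
--         "total_texts": 0,
--         "reference_na": 0,
--         "total_system_texts": 0,
--         "system_provided_na": 0,
--         "system_provided_correct_na": 0,
--     }
--
--     for text_id in reference_corrections: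
--         increment_counter(counters, "total_texts")
--
--         # removing non ascii chars
--         reference_correction = reference_corrections[text_id]
--
--         if remove_nonprint:
--             reference_correction = ''.join(filter(lambda x: x in string.printable, str(reference_correction)))
--
--         if reference_correction == "NA":
--             increment_counter(counters, "reference_na")
--
--         if text_id in candidate_corrections:
--             increment_counter(counters, "total_system_texts")
--             candidate = candidate_corrections[text_id]
--
--             if remove_nonprint:
--                 candidate = ''.join(filter(lambda x: x in string.printable, candidate))
--
--             if candidate == "NA":
--                 increment_counter(counters, "system_provided_na")
--
--             # matching NA counts as 1
--             if reference_correction == "NA" and candidate == "NA":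
--                 increment_counter(counters, "system_provided_correct_na")
--                 continue
--
--             # Run provided "NA" when a correction was required (=> 0)
--             # or Run provided a correction when "NA" was required (=> 0)
--             if candidate == "NA" or reference_correction == "NA":
--                 continue
--
--             # remaining case is both reference and candidate are not "NA"
--             # both are inserted/added for ROUGE/BLEURT/etc. computation
--             references.append(reference_correction)
--             predictions.append(candidate)
--
--     return references, predictions, counters
-- ===== SOURCE B (Python) =====
-- import string
--
-- def get_nlg_eval_data(reference_corrections, candidate_corrections, remove_nonprint = False):
--     printable = set(string.printable)
--
--     def clean(x, wrap_str):
--         s = str(x) if wrap_str else x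
--         if remove_nonprint:
--             s = ''.join(c for c in s if c in printable)
--         return s
--
--     ref_clean = {tid: clean(v, True) for tid, v in reference_corrections.items()}
--     shared = [tid for tid in ref_clean if tid in candidate_corrections]
--     cand_clean = {tid: clean(candidate_corrections[tid], False) for tid in shared}
--
--     counters = {
--         "total_texts": len(reference_corrections),
--         "reference_na": sum(1 for v in ref_clean.values() if v == "NA"),
--         "total_system_texts": len(shared),
--         "system_provided_na": sum(1 for tid in shared if cand_clean[tid] == "NA"),
--         "system_provided_correct_na": sum(1 for tid in shared
--                                           if cand_clean[tid] == "NA" and ref_clean[tid] == "NA"),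
--     }
--
--     keep = [tid for tid in shared if ref_clean[tid] != "NA" and cand_clean[tid] != "NA"]
--     references = [ref_clean[tid] for tid in keep]
--     predictions = [cand_clean[tid] for tid in keep]
--     return references, predictions, counters
-- ===== Notes on version B (the rewrite author's own statement) =====
-- stated objective: alternative
-- what changed: Replaces A's single fused loop with mutable counters and continue-driven control flow by independent per-statistic aggregations: a clean() helper with a printable set, each counter computed by its own sum/len over the shared keys, and the reference/prediction lists built by comprehensions over a shared keep list.
import Mathlib
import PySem

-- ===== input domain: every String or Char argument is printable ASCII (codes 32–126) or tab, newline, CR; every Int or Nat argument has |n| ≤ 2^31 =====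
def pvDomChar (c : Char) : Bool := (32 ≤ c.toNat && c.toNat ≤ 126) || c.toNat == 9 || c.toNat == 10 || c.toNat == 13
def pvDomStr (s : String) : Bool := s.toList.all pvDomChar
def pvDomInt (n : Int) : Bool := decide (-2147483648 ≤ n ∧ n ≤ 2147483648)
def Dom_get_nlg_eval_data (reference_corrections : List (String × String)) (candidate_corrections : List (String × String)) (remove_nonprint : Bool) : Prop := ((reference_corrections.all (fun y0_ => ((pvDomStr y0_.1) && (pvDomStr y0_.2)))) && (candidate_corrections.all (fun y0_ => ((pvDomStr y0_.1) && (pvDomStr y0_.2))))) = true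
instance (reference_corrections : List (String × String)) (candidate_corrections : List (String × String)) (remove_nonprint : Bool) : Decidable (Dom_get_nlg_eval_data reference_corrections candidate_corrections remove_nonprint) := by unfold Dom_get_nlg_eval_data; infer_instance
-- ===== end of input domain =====

-- B replaces A's single fused loop (mutable counters dict + two growing lists) by independent
-- per-statistic aggregations (counts/comprehensions over the shared keys); objective: alternative decomposition, same cost.

-- ===== PORT A =====
-- string.printable (the \x0b and \x0c characters are appended as explicit code points)
def pvPrintableA : List Char :=
  "0123456789abcdefghijklmnopqrstuvwxyzABCDEFGHIJKLMNOPQRSTUVWXYZ!\"#$%&'()*+,-./:;<=>?@[\\]^_`{|}~ \t\n\r".toList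
    ++ [Char.ofNat 11, Char.ofNat 12]

-- increment_counter(counters, name); name is always a present key, so counters[name] = (get? name).getD 0
def pvIncCounter (counters : PySem.Dict String Int) (name : String) : PySem.Dict String Int :=
  counters.insert name (((counters.get? name).getD 0) + 1)

-- ''.join(filter(lambda x: x in string.printable, s))
def pvFilterPrintA (s : String) : String :=
  String.mk (s.toList.filter (fun c => pvPrintableA.contains c))

-- the for-loop over the reference dict's keys; state = (references, predictions, counters)
def pvLoopA (refD candD : PySem.Dict String String) (remove : Bool) :
    List String → (List String × List String × PySem.Dict String Int) →
    (List String × List String × PySem.Dict String Int)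
  | [], st => st
  | tid :: rest, (refs, preds, cnt0) =>
    let cnt1 := pvIncCounter cnt0 "total_texts"
    -- str(reference_correction) : identity on a value that is already a string
    let rc0 := (refD.get? tid).getD ""
    let rc := if remove then pvFilterPrintA rc0 else rc0
    let cnt2 := if rc == "NA" then pvIncCounter cnt1 "reference_na" else cnt1
    if candD.contains tid then
      let cnt3 := pvIncCounter cnt2 "total_system_texts"
      let cd0 := (candD.get? tid).getD ""
      let cd := if remove then pvFilterPrintA cd0 else cd0
      let cnt4 := if cd == "NA" then pvIncCounter cnt3 "system_provided_na" else cnt3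
      if rc == "NA" && cd == "NA" then
        pvLoopA refD candD remove rest (refs, preds, pvIncCounter cnt4 "system_provided_correct_na")
      else if cd == "NA" || rc == "NA" then
        pvLoopA refD candD remove rest (refs, preds, cnt4)
      else
        pvLoopA refD candD remove rest (refs ++ [rc], preds ++ [cd], cnt4)
    else
      pvLoopA refD candD remove rest (refs, preds, cnt2)

def get_nlg_eval_data (reference_corrections : List (String × String)) (candidate_corrections : List (String × String)) (remove_nonprint : Bool) : List String × List String × (List (String × Int)) :=
  let refD : PySem.Dict String String := PySem.Dict.mk reference_corrections
  let candD : PySem.Dict String String := PySem.Dict.mk candidate_corrections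
  let counters : PySem.Dict String Int :=
    PySem.Dict.mk [("total_texts", 0), ("reference_na", 0), ("total_system_texts", 0),
                   ("system_provided_na", 0), ("system_provided_correct_na", 0)]
  let st := pvLoopA refD candD remove_nonprint refD.keys ([], [], counters)
  (st.1, st.2.1, st.2.2.items)

-- ===== PORT B =====
-- printable = set(string.printable)
def pvPrintableB : PySem.Set Char :=
  PySem.Set.ofList
    ("0123456789abcdefghijklmnopqrstuvwxyzABCDEFGHIJKLMNOPQRSTUVWXYZ!\"#$%&'()*+,-./:;<=>?@[\\]^_`{|}~ \t\n\r".toList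
      ++ [Char.ofNat 11, Char.ofNat 12])

-- clean(x, wrap_str); str() on the reference side is the identity on strings
def pvCleanB (remove : Bool) (s : String) : String :=
  if remove then String.mk (s.toList.filter (fun c => pvPrintableB.contains c)) else s

def get_nlg_eval_data_alt (reference_corrections : List (String × String)) (candidate_corrections : List (String × String)) (remove_nonprint : Bool) : List String × List String × (List (String × Int)) :=
  let refD : PySem.Dict String String := PySem.Dict.mk reference_corrections
  let candD : PySem.Dict String String := PySem.Dict.mk candidate_corrections
  let refC := fun tid => pvCleanB remove_nonprint ((refD.get? tid).getD "")
  let candC := fun tid => pvCleanB remove_nonprint ((candD.get? tid).getD "")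
  let shared := refD.keys.filter (fun tid => candD.contains tid)
  let counters : List (String × Int) :=
    [("total_texts", (refD.size : Int)),
     ("reference_na", (refD.keys.countP (fun tid => refC tid == "NA") : Int)),
     ("total_system_texts", (shared.length : Int)),
     ("system_provided_na", (shared.countP (fun tid => candC tid == "NA") : Int)),
     ("system_provided_correct_na", (shared.countP (fun tid => candC tid == "NA" && refC tid == "NA") : Int))]
  let keep := shared.filter (fun tid => refC tid != "NA" && candC tid != "NA")
  (keep.map refC, keep.map candC, counters)

-- ===== PRECONDITION & SPEC =====
def Spec_get_nlg_eval_data (reference_corrections : List (String × String)) (candidate_corrections : List (String × String)) (remove_nonprint : Bool) (out : List String × List String × (List (String × Int))) : Prop := out = get_nlg_eval_data_alt reference_corrections candidate_corrections remove_nonprint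
instance (reference_corrections : List (String × String)) (candidate_corrections : List (String × String)) (remove_nonprint : Bool) (out : List String × List String × (List (String × Int))) : Decidable (Spec_get_nlg_eval_data reference_corrections candidate_corrections remove_nonprint out) := by unfold Spec_get_nlg_eval_data; infer_instance

-- ===== CLAIM (what is proved, stated in full; the proofs are below) =====
def Claim_equal_get_nlg_eval_data : Prop := ∀ (reference_corrections : List (String × String)) (candidate_corrections : List (String × String)) (remove_nonprint : Bool), Dom_get_nlg_eval_data reference_corrections candidate_corrections remove_nonprint → Spec_get_nlg_eval_data reference_corrections candidate_corrections remove_nonprint (get_nlg_eval_data reference_corrections candidate_corrections remove_nonprint)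

-- ===== LEMMAS AND PROOFS =====

-- the five-slot counters dict as a function of its values
def pvMkC (a b c d e : Int) : PySem.Dict String Int :=
  PySem.Dict.mk [("total_texts", a), ("reference_na", b), ("total_system_texts", c),
                 ("system_provided_na", d), ("system_provided_correct_na", e)]

lemma pvIncC_tt (a b c d e : Int) : pvIncCounter (pvMkC a b c d e) "total_texts" = pvMkC (a+1) b c d e := by
  rfl

lemma pvIncC_rna (a b c d e : Int) : pvIncCounter (pvMkC a b c d e) "reference_na" = pvMkC a (b+1) c d e := by
  rfl

lemma pvIncC_tst (a b c d e : Int) : pvIncCounter (pvMkC a b c d e) "total_system_texts" = pvMkC a b (c+1) d e := by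
  rfl

lemma pvIncC_sna (a b c d e : Int) : pvIncCounter (pvMkC a b c d e) "system_provided_na" = pvMkC a b c (d+1) e := by
  rfl

lemma pvIncC_scna (a b c d e : Int) : pvIncCounter (pvMkC a b c d e) "system_provided_correct_na" = pvMkC a b c d (e+1) := by
  rfl

-- B's set-based printable test agrees with A's list-based one
lemma pvPrintable_eq (c : Char) : pvPrintableB.contains c = pvPrintableA.contains c := by
  simp only [pvPrintableB, pvPrintableA, PySem.Set.contains_eq_listContains]
  rw [Bool.eq_iff_iff]
  simp only [List.contains_iff_mem, PySem.Set.mem_ofList]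

lemma pvClean_eq (remove : Bool) (s : String) :
    pvCleanB remove s = if remove then pvFilterPrintA s else s := by
  simp only [pvCleanB, pvFilterPrintA, pvPrintable_eq]

-- loop characterisation
lemma pvLoopA_spec (refD candD : PySem.Dict String String) (remove : Bool)
    (keys refs preds : List String) (a b c d e : Int) :
    pvLoopA refD candD remove keys (refs, preds, pvMkC a b c d e) =
      (let fR := fun tid => pvCleanB remove ((refD.get? tid).getD "")
       let fC := fun tid => pvCleanB remove ((candD.get? tid).getD "")
       let shared := keys.filter (fun tid => candD.contains tid)
       let keep := shared.filter (fun tid => fR tid != "NA" && fC tid != "NA")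
       (refs ++ keep.map fR, preds ++ keep.map fC,
        pvMkC (a + keys.length)
              (b + keys.countP (fun tid => fR tid == "NA"))
              (c + shared.length)
              (d + shared.countP (fun tid => fC tid == "NA"))
              (e + shared.countP (fun tid => fC tid == "NA" && fR tid == "NA")))) := by
  induction keys generalizing refs preds a b c d e with
  | nil => simp [pvLoopA]
  | cons k rest ih =>
    simp only [pvLoopA]
    simp only [pvClean_eq]
    cases hc : candD.contains k <;>
    by_cases hr : (if remove then pvFilterPrintA ((refD.get? k).getD "") else ((refD.get? k).getD "")) = "NA" <;>
    by_cases hcd : (if remove then pvFilterPrintA ((candD.get? k).getD "") else ((candD.get? k).getD "")) = "NA" <;>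
      simp [hc, hr, hcd, beq_iff_eq, pvIncC_tt, pvIncC_rna, pvIncC_tst, pvIncC_sna, pvIncC_scna,
        ih, pvClean_eq, List.filter_cons, List.countP_cons] <;>
      (try simp only [pvMkC, PySem.Dict.mk.injEq, List.cons.injEq, Prod.mk.injEq, and_true, true_and]) <;>
      omega

-- ===== VERDICT (by name: the statement is the Claim_ definition above) =====
theorem get_nlg_eval_data_spec : Claim_equal_get_nlg_eval_data := by
  intro reference_corrections candidate_corrections remove_nonprint _
  unfold Spec_get_nlg_eval_data
  show _ = _
  simp only [get_nlg_eval_data, get_nlg_eval_data_alt]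
  have h0 : (PySem.Dict.mk [("total_texts", (0:Int)), ("reference_na", 0), ("total_system_texts", 0),
      ("system_provided_na", 0), ("system_provided_correct_na", 0)]) = pvMkC 0 0 0 0 0 := rfl
  rw [h0, pvLoopA_spec]
  simp [pvMkC, PySem.Dict.size, PySem.Dict.keys]
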